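-- pv_equiv track=rewrite | github.com/IgorSterkhov/snippets_helper | main.py | _combine_values
-- ===== SOURCE A (Python) =====
-- from itertools import product
--
-- def _combine_values(placeholders_values: dict, mode: str) -> list[dict]:
--     if not placeholders_values:
--         return [{}]
--
--     keys = list(placeholders_values.keys())
--     values = [placeholders_values[k] for k in keys]
--
--     if mode == 'cartesian':
--         return [dict(zip(keys, combo)) for combo in product(*values)]
--     else:  # zip
--         return [dict(zip(keys, combo)) for combo in zip(*values)]
-- ===== SOURCE B (Python) =====
-- def _combine_values(placeholders_values: dict, mode: str) -> list[dict]: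
--     if not placeholders_values:
--         return [{}]
--     items = list(placeholders_values.items())
--     if mode == 'cartesian':
--         # mixed-radix decoding: row t picks vals[t // stride % len(vals)] per column
--         strides, total = [], 1
--         for _, vals in reversed(items):
--             strides.append(total)
--             total *= len(vals)
--         strides.reverse()
--         return [{key: vals[t // stride % len(vals)]
--                  for (key, vals), stride in zip(items, strides)}
--                 for t in range(total)]
--     n = min(len(vals) for _, vals in items)
--     return [{key: vals[t] for key, vals in items} for t in range(n)]
-- ===== Notes on version B (the rewrite author's own statement) =====
-- stated objective: alternative
-- what changed: Instead of itertools.product followed by re-zipping with the keys, B enumerates rows by a single counter t in range(prod of lengths) and decodes each cell arithmetically with mixed-radix strides (vals[t // stride % len(vals)]); the zip branch indexes every column by the same position t up to the shortest length instead of transposing with zip(*values).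
import Mathlib
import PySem

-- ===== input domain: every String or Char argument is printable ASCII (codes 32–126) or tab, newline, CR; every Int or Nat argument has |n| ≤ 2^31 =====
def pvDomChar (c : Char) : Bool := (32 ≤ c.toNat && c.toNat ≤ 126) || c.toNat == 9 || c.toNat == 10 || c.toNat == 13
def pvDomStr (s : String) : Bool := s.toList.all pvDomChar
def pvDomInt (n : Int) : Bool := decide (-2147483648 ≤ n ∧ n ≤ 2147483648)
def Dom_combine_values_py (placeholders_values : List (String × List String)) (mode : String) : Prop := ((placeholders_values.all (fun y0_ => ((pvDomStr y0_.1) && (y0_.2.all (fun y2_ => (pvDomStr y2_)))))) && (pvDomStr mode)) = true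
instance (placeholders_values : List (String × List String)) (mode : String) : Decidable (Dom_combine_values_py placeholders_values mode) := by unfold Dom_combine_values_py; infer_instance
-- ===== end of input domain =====

-- B replaces itertools.product with arithmetic mixed-radix decoding of a single row counter
-- (vals[t // stride % len]) and the zip branch with positional indexing up to the shortest list
-- (objective: alternative algorithm, same cost).


-- ===== PORT A =====

-- itertools.product(*values): standard recursive definition (library call, ported as the
-- corresponding recursive function; order is Python's, last pool varies fastest).
def pyProduct {α : Type} : List (List α) → List (List α)
  | [] => [[]]
  | v :: vs => v.flatMap (fun x => (pyProduct vs).map (fun combo => x :: combo))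

-- termination lemma for zipN, cited by its decreasing_by
theorem zipN_dec {α : Type} (ls : List (List α)) (h1 : ls ≠ [])
    (h2 : ls.all (fun l => !l.isEmpty) = true) :
    (((ls.map List.tail).map List.length).sum) < ((ls.map List.length).sum) := by
  match ls with
  | [] => exact absurd rfl h1
  | l :: rest =>
    simp only [List.all_cons, Bool.and_eq_true] at h2
    have hl : l ≠ [] := by
      cases l with
      | nil => simp at h2
      | cons a as => simp
    have hrest : ((rest.map List.tail).map List.length).sum ≤ ((rest.map List.length).sum) := by
      rw [List.map_map]
      exact List.sum_le_sum (fun i _ => by simpa using List.length_tail_le i)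
    have hlt : l.tail.length < l.length := by
      cases l with
      | nil => exact absurd rfl hl
      | cons a as => simp
    simp only [List.map_cons, List.sum_cons]
    omega

-- zip(*values): emit the heads while every list is nonempty (shortest-stop semantics).
def zipN {α : Type} (ls : List (List α)) : List (List α) :=
  if h : ls ≠ [] ∧ ls.all (fun l => !l.isEmpty) = true then
    ls.filterMap List.head? :: zipN (ls.map List.tail)
  else []
termination_by (ls.map List.length).sum
decreasing_by exact zipN_dec ls h.1 h.2

def combine_values_py (placeholders_values : List (String × List String)) (mode : String) : List (List (String × String)) :=
  if placeholders_values = [] then [[]]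
  else
    let d := PySem.Dict.mk placeholders_values
    let keys := d.keys
    -- placeholders_values[k]: dict lookup; k always present, so the getD default is never used
    let values := keys.map (fun k => d.getD k [])
    if mode = "cartesian" then
      (pyProduct values).map (fun combo => (PySem.Dict.ofList (keys.zip combo)).items)
    else
      (zipN values).map (fun combo => (PySem.Dict.ofList (keys.zip combo)).items)

-- ===== PORT B =====

def combine_values_py_alt (placeholders_values : List (String × List String)) (mode : String) : List (List (String × String)) :=
  if placeholders_values = [] then [[]]
  else if mode = "cartesian" then
    -- strides/total loop over reversed(items), then strides.reverse()
    let p := placeholders_values.reverse.foldl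
      (fun (acc : List Nat × Nat) kv => (acc.1 ++ [acc.2], acc.2 * kv.2.length)) ([], 1)
    let strides := p.1.reverse
    -- vals[t // stride % len(vals)]: the index is < len(vals) whenever the row exists
    (List.range p.2).map (fun t =>
      (PySem.Dict.ofList ((placeholders_values.zip strides).map
        (fun q => (q.1.1, q.1.2.getD ((t / q.2) % q.1.2.length) "")))).items)
  else
    -- n = min(len(vals) …): the list is nonempty here, so min? is some; vals[t] has t < n ≤ len(vals)
    let n := ((placeholders_values.map (fun kv => kv.2.length)).min?).getD 0
    (List.range n).map (fun t =>
      (PySem.Dict.ofList (placeholders_values.map (fun kv => (kv.1, kv.2.getD t "")))).items)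

-- ===== PRECONDITION & SPEC =====
-- The argument encodes a Python dict, whose keys are necessarily distinct; Pre_ excludes only
-- duplicate-key association lists, which correspond to no actual Python input of A.
def Pre_combine_values_py (placeholders_values : List (String × List String)) (mode : String) : Prop :=
  (placeholders_values.map Prod.fst).Nodup
instance (placeholders_values : List (String × List String)) (mode : String) : Decidable (Pre_combine_values_py placeholders_values mode) := by unfold Pre_combine_values_py; infer_instance

def pvWitness_combine_values_py : (List (String × List String)) × String :=
  ([("a", ["1", "2"]), ("b", ["x"])], "cartesian")

def Spec_combine_values_py (placeholders_values : List (String × List String)) (mode : String) (out : List (List (String × String))) : Prop := out = combine_values_py_alt placeholders_values mode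
instance (placeholders_values : List (String × List String)) (mode : String) (out : List (List (String × String))) : Decidable (Spec_combine_values_py placeholders_values mode out) := by unfold Spec_combine_values_py; infer_instance

-- ===== CLAIM (what is proved, stated in full; the proofs are below) =====
def Claim_equal_combine_values_py : Prop := ∀ (placeholders_values : List (String × List String)) (mode : String), Dom_combine_values_py placeholders_values mode → Pre_combine_values_py placeholders_values mode → Spec_combine_values_py placeholders_values mode (combine_values_py placeholders_values mode)

-- ===== LEMMAS AND PROOFS =====

def prodLens (vs : List (List String)) : Nat := (vs.map List.length).prod

def stridesOf : List (List String) → List Nat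
  | [] => []
  | _ :: vs => prodLens vs :: stridesOf vs

-- [placeholders_values[k] for k in keys] is just the value column when keys are distinct
theorem values_eq_map_snd (pv : List (String × List String))
    (h : (pv.map Prod.fst).Nodup) :
    (pv.map Prod.fst).map (fun k => (PySem.Dict.mk pv).getD k []) = pv.map Prod.snd := by
  induction pv with
  | nil => rfl
  | cons kv rest ih =>
    obtain ⟨k0, v0⟩ := kv
    simp only [List.map_cons, List.nodup_cons] at h ⊢
    rw [List.cons_eq_cons]
    refine ⟨?_, ?_⟩
    · simp [PySem.Dict.getD_eq_get?_getD, PySem.Dict.get?_mk_cons]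
    · rw [List.map_congr_left (fun k hk => ?_), ih h.2]
      have hne : k0 ≠ k := fun he => h.1 (he ▸ hk)
      simp [PySem.Dict.getD_eq_get?_getD, PySem.Dict.get?_mk_cons, hne]

-- B's reversed stride loop computes (stridesOf, total product)
theorem strides_fold (pv : List (String × List String)) :
    pv.reverse.foldl
      (fun (acc : List Nat × Nat) kv => (acc.1 ++ [acc.2], acc.2 * kv.2.length)) ([], 1)
      = ((stridesOf (pv.map Prod.snd)).reverse, prodLens (pv.map Prod.snd)) := by
  rw [List.foldl_reverse]
  induction pv with
  | nil => simp [stridesOf, prodLens]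
  | cons kv rest ih =>
    simp only [List.foldr_cons, ih, List.map_cons, stridesOf, List.reverse_cons, prodLens,
      List.prod_cons]
    exact Prod.ext rfl (Nat.mul_comm _ _)

theorem range_mul_flatMap (a b : Nat) :
    List.range (a * b) = (List.range a).flatMap (fun i => (List.range b).map (fun j => i * b + j)) := by
  induction a with
  | zero => simp
  | succ a ih =>
    rw [Nat.succ_mul, List.range_add, List.range_succ, List.flatMap_append, ← ih]
    simp [Nat.add_comm]

theorem flatMap_range_getD {β : Type} (l : List String) (f : String → List β) :
    l.flatMap f = (List.range l.length).flatMap (fun i => f (l.getD i "")) := by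
  induction l with
  | nil => simp
  | cons x xs ih =>
    rw [List.flatMap_cons, List.length_cons, List.range_succ_eq_map, List.flatMap_cons]
    simp only [List.flatMap_map, List.getD_cons_zero, List.getD_cons_succ]
    rw [ih]

theorem head_pick (len N i j : Nat) (hi : i < len) (hj : j < N) :
    ((i * N + j) / N) % len = i := by
  have hN : 0 < N := Nat.pos_of_ne_zero (by omega)
  rw [show i * N + j = N * i + j by ring, Nat.mul_add_div hN, Nat.div_eq_of_lt hj,
    Nat.add_zero, Nat.mod_eq_of_lt hi]

theorem tail_pick (st len m i j : Nat) :
    ((i * (st * len * m) + j) / st) % len = (j / st) % len := by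
  rcases Nat.eq_zero_or_pos st with h | h
  · subst h; simp
  · rw [show i * (st * len * m) + j = st * (i * (len * m)) + j by ring, Nat.mul_add_div h,
      show i * (len * m) + j / st = j / st + i * m * len by ring, Nat.add_mul_mod_self_right]

theorem stride_dvd : ∀ (vs : List (List String)), ∀ p ∈ vs.zip (stridesOf vs),
    p.2 * p.1.length ∣ prodLens vs := by
  intro vs
  induction vs with
  | nil => simp [stridesOf]
  | cons v rest ih =>
    intro p hp
    rw [stridesOf, List.zip_cons_cons, List.mem_cons] at hp
    rcases hp with h | h
    · subst h
      exact Dvd.intro_left 1 (by simp [prodLens, List.prod_cons, Nat.mul_comm])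
    · exact dvd_trans (ih p h) ⟨v.length, by simp [prodLens, List.prod_cons, Nat.mul_comm]⟩

-- the core algorithm change: product order = mixed-radix decoding of a row counter
theorem product_decode : ∀ (vs : List (List String)),
    pyProduct vs = (List.range (prodLens vs)).map
      (fun t => (vs.zip (stridesOf vs)).map
        (fun p => p.1.getD ((t / p.2) % p.1.length) "")) := by
  intro vs
  induction vs with
  | nil => simp [pyProduct, prodLens, stridesOf]
  | cons v rest ih =>
    have hN : prodLens (v :: rest) = v.length * prodLens rest := by
      simp [prodLens, List.prod_cons]
    rw [pyProduct, ih, hN, range_mul_flatMap, List.map_flatMap]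
    simp only [List.map_map, Function.comp_def]
    rw [flatMap_range_getD v (fun x => (List.range (prodLens rest)).map
        (fun t => x :: (rest.zip (stridesOf rest)).map
          (fun p => p.1.getD ((t / p.2) % p.1.length) "")))]
    apply List.flatMap_congr
    intro i hi
    rw [List.mem_range] at hi
    apply List.map_congr_left
    intro j hj
    rw [List.mem_range] at hj
    simp only [stridesOf, List.zip_cons_cons, List.map_cons]
    rw [List.cons_eq_cons]
    constructor
    · rw [head_pick v.length (prodLens rest) i j hi hj]
    · apply List.map_congr_left
      intro p hp
      obtain ⟨m, hm⟩ := stride_dvd rest p hp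
      rw [hm, tail_pick]

-- keys-zip of a decoded combo is B's pairwise row
theorem zip_row (pv : List (String × List String)) (t : Nat) :
    (pv.map Prod.fst).zip
      (((pv.map Prod.snd).zip (stridesOf (pv.map Prod.snd))).map
        (fun p => p.1.getD ((t / p.2) % p.1.length) ""))
    = (pv.zip (stridesOf (pv.map Prod.snd))).map
        (fun q => (q.1.1, q.1.2.getD ((t / q.2) % q.1.2.length) "")) := by
  induction pv with
  | nil => rfl
  | cons kv rest ih =>
    simp only [List.map_cons, stridesOf, List.zip_cons_cons]
    rw [ih]

-- l[i+1] reads past the head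
theorem getD_succ_tail (l : List String) (i : Nat) (d : String) :
    l.getD (i + 1) d = l.tail.getD i d := by cases l <;> simp

-- the heads of nonempty lists
theorem heads_eq (ls : List (List String)) (h : ∀ l ∈ ls, l ≠ []) :
    ls.filterMap List.head? = ls.map (fun l => l.getD 0 "") := by
  induction ls with
  | nil => rfl
  | cons l rest ih =>
    have hl := h l (by simp)
    cases l with
    | nil => exact absurd rfl hl
    | cons a as => simp [ih (fun x hx => h x (by simp [hx]))]

-- zipN is positional indexing up to the minimum length
theorem zipN_eq_range_map (n : Nat) : ∀ (ls : List (List String)), ls ≠ [] →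
    ((ls.map List.length).min?).getD 0 = n →
    zipN ls = (List.range n).map (fun i => ls.map (fun l => l.getD i "")) := by
  induction n with
  | zero =>
    intro ls hne hmin
    obtain ⟨m, hm⟩ : ∃ m, (ls.map List.length).min? = some m := by
      cases h : (ls.map List.length).min? with
      | none => exact absurd (List.map_eq_nil_iff.mp (List.min?_eq_none_iff.mp h)) hne
      | some m => exact ⟨m, rfl⟩
    rw [hm] at hmin
    simp only [Option.getD_some] at hmin
    subst hmin
    obtain ⟨l0, hl0, hlen⟩ := List.mem_map.mp (List.min?_mem hm)
    rw [zipN, dif_neg]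
    · simp
    · rintro ⟨-, hall⟩
      rw [List.all_eq_true] at hall
      have h0 := hall l0 hl0
      simp only [Bool.not_eq_eq_eq_not, Bool.not_true, List.isEmpty_eq_false_iff] at h0
      exact h0 (List.length_eq_zero_iff.mp hlen)
  | succ m ih =>
    intro ls hne hmin
    have hsome : (ls.map List.length).min? = some (m + 1) := by
      cases h : (ls.map List.length).min? with
      | none => exact absurd (List.map_eq_nil_iff.mp (List.min?_eq_none_iff.mp h)) hne
      | some k => rw [h] at hmin; simpa using hmin
    obtain ⟨hmem, hbound⟩ := List.min?_eq_some_iff.mp hsome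
    obtain ⟨l0, hl0, hlen0⟩ := List.mem_map.mp hmem
    have hne' : ∀ l ∈ ls, l ≠ [] := by
      intro l hl he
      have := hbound l.length (List.mem_map.mpr ⟨l, hl, rfl⟩)
      simp [he] at this
    have hall : ls.all (fun l => !l.isEmpty) = true := by
      rw [List.all_eq_true]
      intro l hl
      simpa [List.isEmpty_iff] using hne' l hl
    have htailmin : ((ls.map List.tail).map List.length).min? = some m := by
      rw [List.map_map]
      rw [List.min?_eq_some_iff]
      constructor
      · exact List.mem_map.mpr ⟨l0, hl0, by simp [hlen0]⟩
      · intro b hb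
        obtain ⟨l, hl, hlb⟩ := List.mem_map.mp hb
        have := hbound l.length (List.mem_map.mpr ⟨l, hl, rfl⟩)
        simp only [Function.comp_apply, List.length_tail] at hlb
        omega
    rw [zipN, dif_pos ⟨hne, hall⟩,
        ih (ls.map List.tail) (by simpa using hne) (by rw [htailmin]; rfl)]
    rw [List.range_succ_eq_map, List.map_cons, List.map_map]
    refine List.cons_eq_cons.mpr ⟨heads_eq ls hne', ?_⟩
    refine List.map_congr_left (fun i _ => ?_)
    rw [List.map_map]
    exact List.map_congr_left (fun l _ => (getD_succ_tail l i "").symm)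

-- ===== VERDICT (by name: the statement is the Claim_ definition above) =====
theorem combine_values_py_spec : Claim_equal_combine_values_py := by
  intro pv mode _ hpre
  unfold Spec_combine_values_py combine_values_py combine_values_py_alt
  by_cases hempty : pv = []
  · simp [hempty]
  · simp only [if_neg hempty, PySem.Dict.keys_mk]
    have hvals : (pv.map (fun x => x.1)).map (fun k => (PySem.Dict.mk pv).getD k [])
        = pv.map Prod.snd := values_eq_map_snd pv hpre
    by_cases hmode : mode = "cartesian"
    · simp only [if_pos hmode]
      rw [hvals, product_decode, strides_fold]
      simp only [List.reverse_reverse, List.map_map]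
      apply List.map_congr_left
      intro t _
      rw [Function.comp_apply, zip_row]
    · simp only [if_neg hmode]
      rw [hvals, zipN_eq_range_map _ (pv.map Prod.snd)
            (by simpa using hempty) rfl]
      simp only [List.map_map, Function.comp_def]
      congr 1
      funext i
      rw [List.zip_map']
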